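-- pv_equiv track=rewrite | github.com/Aphtasik/Epita-S6-ERO | scripts/chasseNeige.py | filter_matrix
-- ===== SOURCE A (Python) =====
-- def filter_matrix(matrix):
--     alone = []
--     length = len(matrix)
--
--     i = 0
--     while i < length:
--         if matrix[i] == []:
--             matrix.pop(i)
--             i = 0
--             length-=1
--         elif len(matrix[i]) == 1:
--             alone.append(matrix[i][0])
--             matrix.pop(i)
--             i = 0
--             length-=1
--         i+=1
--
--     matrix[0].extend(alone)
--     return matrix
-- ===== SOURCE B (Python) =====
-- def filter_matrix(matrix):
--     kept = [row for row in matrix if len(row) >= 2]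
--     alone = [row[0] for row in matrix if len(row) == 1]
--     if kept:
--         kept[0].extend(alone)
--         return kept
--     return [alone]
-- ===== Notes on version B (the rewrite author's own statement) =====
-- stated objective: simpler
-- what changed: Replaced A's pop-and-restart while loop (which rescans the list from index 0 after every removal, mutating it in place) by two single-pass comprehensions that split rows into kept lists and singleton values, then extends the first kept row (or returns the singletons as the only row when no long row remains).
-- intended difference: When the matrix has at least two rows whose first two are both short (empty or singleton) and either some long row exists or the first two rows are distinct non-empty singletons, A's reset-then-increment skips re-checking the new head after a pop, so A returns a matrix in which a short row survives at the front; B returns the matrix with every short row removed and its singletons appended to the first long row, as intended. — e.g. on filter_matrix([[1], [2], [3, 4]]): A returns [[2, 1], [3, 4]], B returns [[3, 4, 1, 2]]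
import Mathlib
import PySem

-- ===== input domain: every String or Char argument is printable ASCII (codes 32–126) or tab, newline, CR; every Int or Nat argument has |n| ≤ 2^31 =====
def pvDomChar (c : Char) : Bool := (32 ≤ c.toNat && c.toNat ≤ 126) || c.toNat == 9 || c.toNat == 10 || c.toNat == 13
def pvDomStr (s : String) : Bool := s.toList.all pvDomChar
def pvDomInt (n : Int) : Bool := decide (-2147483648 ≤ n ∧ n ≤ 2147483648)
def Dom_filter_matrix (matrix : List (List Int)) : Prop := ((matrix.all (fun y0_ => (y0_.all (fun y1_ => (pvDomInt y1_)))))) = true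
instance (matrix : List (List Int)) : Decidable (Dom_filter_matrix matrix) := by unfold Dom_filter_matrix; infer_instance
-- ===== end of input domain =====

-- B splits the rows in two single-pass comprehensions instead of A's pop-and-restart while loop
-- (and fixes A's skipped-new-head quirk, see D_ below); Python A mutates its argument in place:
-- the equivalence proved here is about the return value only.

-- ===== PORT A =====
-- Python A keeps a separate `length` variable that always equals len(matrix) (both drop by one
-- at every pop), so the port uses matrix.length for it; matrix[i] with 0 ≤ i < length is always
-- in range and is ported as getD i [].
def loopA (matrix : List (List Int)) (alone : List Int) (i : Nat) : List (List Int) × List Int :=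
  if _h : i < matrix.length then
    let row := matrix.getD i []
    if row = [] then
      loopA (matrix.eraseIdx i) alone 1                      -- pop; i = 0; i += 1
    else if row.length = 1 then
      loopA (matrix.eraseIdx i) (alone ++ [row.getD 0 0]) 1  -- append row[0]; pop; i = 0; i += 1
    else
      loopA matrix alone (i + 1)
  else
    (matrix, alone)
termination_by (matrix.length, matrix.length - i)
decreasing_by
  · apply Prod.Lex.left; simp [List.length_eraseIdx_of_lt _h]; omega
  · apply Prod.Lex.left; simp [List.length_eraseIdx_of_lt _h]; omega
  · apply Prod.Lex.right; omega

def filter_matrix (matrix : List (List Int)) : List (List Int) :=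
  let r := loopA matrix [] 0
  match r.1 with
  | [] => []                      -- Python raises IndexError on matrix[0] here; outside Pre_
  | h :: t => (h ++ r.2) :: t     -- matrix[0].extend(alone)

-- ===== PORT B =====
-- the two comprehensions of Source B
def keepL (m : List (List Int)) : List (List Int) := m.filter (fun r => 2 ≤ r.length)
def singL (m : List (List Int)) : List Int := (m.filter (fun r => r.length = 1)).map (fun r => r.getD 0 0)

def filter_matrix_alt (matrix : List (List Int)) : List (List Int) :=
  match keepL matrix with
  | [] => [singL matrix]                    -- no long row: the singletons form the only row
  | h :: t => (h ++ singL matrix) :: t      -- kept[0].extend(alone)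

-- ===== PRECONDITION & SPEC =====
-- Pre_ excludes exactly the inputs on which Python A raises IndexError at `matrix[0].extend`:
-- the empty matrix and a single-row matrix whose only row is empty or a singleton.
def Pre_filter_matrix (matrix : List (List Int)) : Prop :=
  matrix ≠ [] ∧ (matrix.length = 1 → 2 ≤ (matrix.getD 0 []).length)
instance (matrix : List (List Int)) : Decidable (Pre_filter_matrix matrix) := by
  unfold Pre_filter_matrix; infer_instance

def pvWitness_filter_matrix : List (List Int) := [[1, 2]]

-- When the matrix has at least two rows, its first two rows are both short (empty or singleton),
-- and either some long row exists or the first two rows are distinct non-empty singletons, A's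
-- reset-then-increment skips re-checking the new head after a pop, so a short row survives at the
-- front of A's output; B removes every short row as intended.
def D_filter_matrix (matrix : List (List Int)) : Prop :=
  2 ≤ matrix.length ∧ (∀ r ∈ matrix.take 2, r.length ≤ 1) ∧
  ((∃ r ∈ matrix, 2 ≤ r.length) ∨
   (matrix.getD 0 [] ≠ [] ∧ matrix.getD 1 [] ≠ [] ∧ matrix.getD 0 [] ≠ matrix.getD 1 []))
instance (matrix : List (List Int)) : Decidable (D_filter_matrix matrix) := by
  unfold D_filter_matrix; infer_instance

def Spec_filter_matrix (matrix : List (List Int)) (out : List (List Int)) : Prop :=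
  ¬ D_filter_matrix matrix → out = filter_matrix_alt matrix
instance (matrix : List (List Int)) (out : List (List Int)) : Decidable (Spec_filter_matrix matrix out) := by
  unfold Spec_filter_matrix; infer_instance

def pvDiffWitness_filter_matrix : List (List Int) := [[1], [2], [3, 4]]
def pvDiffWitnessOut_filter_matrix : (List (List Int)) × (List (List Int)) :=
  ([[2, 1], [3, 4]], [[3, 4, 1, 2]])

-- ===== CLAIM (what is proved, stated in full; the proofs are below) =====
def Claim_unchanged_filter_matrix : Prop := ∀ (matrix : List (List Int)), Dom_filter_matrix matrix → Pre_filter_matrix matrix → Spec_filter_matrix matrix (filter_matrix matrix)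
def Claim_changed_filter_matrix : Prop := Dom_filter_matrix (pvDiffWitness_filter_matrix) ∧ Pre_filter_matrix (pvDiffWitness_filter_matrix) ∧ D_filter_matrix (pvDiffWitness_filter_matrix) ∧ filter_matrix (pvDiffWitness_filter_matrix) = pvDiffWitnessOut_filter_matrix.1 ∧ filter_matrix_alt (pvDiffWitness_filter_matrix) = pvDiffWitnessOut_filter_matrix.2 ∧ pvDiffWitnessOut_filter_matrix.1 ≠ pvDiffWitnessOut_filter_matrix.2
def Claim_exact_filter_matrix : Prop := ∀ (matrix : List (List Int)), Dom_filter_matrix matrix → Pre_filter_matrix matrix → D_filter_matrix matrix → filter_matrix matrix ≠ filter_matrix_alt matrix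

-- ===== LEMMAS AND PROOFS =====

theorem short_cases (r : List Int) (h : ¬ 2 ≤ r.length) : r = [] ∨ r.length = 1 := by
  cases r with
  | nil => exact Or.inl rfl
  | cons a t =>
    right
    simp only [List.length_cons] at h ⊢
    omega

theorem getD_append_len (xs l : List (List Int)) : (xs ++ l).getD xs.length [] = l.getD 0 [] := by
  cases l with
  | nil => simp [List.getD]
  | cons h t => simp [List.getD, List.getElem?_append_right (Nat.le_refl _)]

theorem eraseIdx_append_len (xs : List (List Int)) (r : List Int) (l : List (List Int)) :
    (xs ++ r :: l).eraseIdx xs.length = xs ++ l := by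
  induction xs with
  | nil => simp
  | cons h t ih => simp [List.eraseIdx, ih]

theorem keepL_clean (l : List (List Int)) (h : ∀ r ∈ l, 2 ≤ r.length) : keepL l = l :=
  List.filter_eq_self.mpr (fun r hr => by simpa using h r hr)

theorem singL_clean (l : List (List Int)) (h : ∀ r ∈ l, 2 ≤ r.length) : singL l = [] := by
  have : l.filter (fun r => r.length = 1) = [] :=
    List.filter_eq_nil_iff.mpr (fun r hr => by have := h r hr; simp; omega)
  simp [singL, this]

theorem keepL_clean_append (pre l : List (List Int)) (h : ∀ r ∈ pre, 2 ≤ r.length) :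
    keepL (pre ++ l) = pre ++ keepL l := by
  simp only [keepL, List.filter_append]
  congr 1
  exact keepL_clean pre h

theorem singL_clean_append (pre l : List (List Int)) (h : ∀ r ∈ pre, 2 ≤ r.length) :
    singL (pre ++ l) = singL l := by
  have : pre.filter (fun r => r.length = 1) = [] :=
    List.filter_eq_nil_iff.mpr (fun r hr => by have := h r hr; simp; omega)
  simp [singL, List.filter_append, this]

-- scanning over a clean (all-long) segment just advances i
theorem loopA_adv (pre : List (List Int)) : ∀ (xs m : List (List Int)) (a : List Int),
    (∀ r ∈ pre, 2 ≤ r.length) →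
    loopA (xs ++ pre ++ m) a xs.length = loopA (xs ++ pre ++ m) a (xs.length + pre.length) := by
  induction pre with
  | nil => intro xs m a _; simp
  | cons p t ih =>
    intro xs m a hcl
    have hp : 2 ≤ p.length := hcl p (by simp)
    have hne : p ≠ [] := by intro h; simp [h] at hp
    have hlt : xs.length < (xs ++ (p :: t) ++ m).length := by
      simp only [List.length_append, List.length_cons]; omega
    have hget : (xs ++ (p :: t) ++ m).getD xs.length [] = p := by
      rw [List.append_assoc, getD_append_len]; simp [List.getD]
    have step : loopA (xs ++ (p :: t) ++ m) a xs.length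
        = loopA (xs ++ (p :: t) ++ m) a (xs.length + 1) := by
      rw [loopA]
      simp only [hlt, dite_true, hget]
      rw [if_neg hne, if_neg (by omega)]
    have harr : xs ++ (p :: t) ++ m = (xs ++ [p]) ++ t ++ m := by simp
    have hih := ih (xs ++ [p]) m a (fun r hr => hcl r (by simp [hr]))
    rw [step, harr, show xs.length + 1 = (xs ++ [p]).length by simp, hih]
    congr 1
    simp only [List.length_append, List.length_cons, List.length_nil]
    omega

theorem loopA_adv1 (pre m : List (List Int)) (a : List Int) (x : List Int)
    (h : ∀ r ∈ pre, 2 ≤ r.length) :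
    loopA (x :: (pre ++ m)) a 1 = loopA (x :: (pre ++ m)) a (1 + pre.length) := by
  have := loopA_adv pre [x] m a h
  simpa using this

-- the main characterisation of A's loop from i = 1: the head is never re-checked,
-- the tail is filtered exactly as B filters it
theorem loopA_one (n : ℕ) : ∀ (m : List (List Int)), m.length ≤ n → ∀ (x : List Int) (a : List Int),
    loopA (x :: m) a 1 = (x :: keepL m, a ++ singL m) := by
  induction n with
  | zero =>
    intro m hm x a
    have : m = [] := List.eq_nil_of_length_eq_zero (by omega)
    subst this
    rw [loopA]; simp [keepL, singL]
  | succ n ih =>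
    intro m hm x a
    have hdec : m = m.takeWhile (fun r => 2 ≤ r.length) ++ m.dropWhile (fun r => 2 ≤ r.length) :=
      (List.takeWhile_append_dropWhile).symm
    have hclean : ∀ r ∈ m.takeWhile (fun r : List Int => 2 ≤ r.length), 2 ≤ r.length := by
      intro r hr
      simpa using List.mem_takeWhile_imp hr
    cases hrest : m.dropWhile (fun r : List Int => 2 ≤ r.length) with
    | nil =>
      have hm' : m = m.takeWhile (fun r : List Int => 2 ≤ r.length) := by
        conv_lhs => rw [hdec]
        rw [hrest, List.append_nil]
      rw [hm', keepL_clean _ hclean, singL_clean _ hclean, List.append_nil]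
      have hadv := loopA_adv1 (m.takeWhile (fun r : List Int => 2 ≤ r.length)) [] a x hclean
      rw [List.append_nil] at hadv
      rw [hadv, loopA]
      have : ¬ (1 + (m.takeWhile (fun r : List Int => 2 ≤ r.length)).length
          < (x :: m.takeWhile (fun r : List Int => 2 ≤ r.length)).length) := by
        simp only [List.length_cons]; omega
      simp [this]
    | cons r m' =>
      have hshort : ¬ 2 ≤ r.length := by
        have := List.head?_dropWhile_not (fun r : List Int => decide (2 ≤ r.length)) m
        rw [hrest] at this
        simpa using this
      have hm' : m = m.takeWhile (fun r : List Int => 2 ≤ r.length) ++ r :: m' := by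
        conv_lhs => rw [hdec]
        rw [hrest]
      set pre := m.takeWhile (fun r : List Int => 2 ≤ r.length) with hpre
      have hihlen : (pre ++ m').length ≤ n := by
        rw [hm'] at hm
        simp only [List.length_append, List.length_cons] at hm ⊢
        omega
      have hlt : 1 + pre.length < (x :: (pre ++ r :: m')).length := by
        simp only [List.length_cons, List.length_append]; omega
      have hget : (x :: (pre ++ r :: m')).getD (1 + pre.length) [] = r := by
        rw [show (x :: (pre ++ r :: m')) = (x :: pre) ++ r :: m' from by simp,
          show 1 + pre.length = (x :: pre).length from by simp [Nat.add_comm],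
          getD_append_len]
        simp [List.getD]
      have herase : (x :: (pre ++ r :: m')).eraseIdx (1 + pre.length) = x :: (pre ++ m') := by
        rw [show (x :: (pre ++ r :: m')) = (x :: pre) ++ r :: m' from by simp,
          show 1 + pre.length = (x :: pre).length from by simp [Nat.add_comm],
          eraseIdx_append_len]
        simp
      rw [hm']
      have hadv := loopA_adv1 pre (r :: m') a x hclean
      rcases short_cases r hshort with h0 | h1
      · -- r = []
        have step : loopA (x :: (pre ++ r :: m')) a (1 + pre.length)
            = loopA (x :: (pre ++ m')) a 1 := by
          rw [loopA]
          simp only [hlt, dite_true, hget]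
          rw [if_pos h0, herase]
        rw [hadv, step, ih (pre ++ m') hihlen x a]
        rw [keepL_clean_append pre m' hclean, keepL_clean_append pre (r :: m') hclean,
          singL_clean_append pre m' hclean, singL_clean_append pre (r :: m') hclean]
        simp [keepL, singL, List.filter_cons, h0]
      · -- r is a singleton
        have hrne : r ≠ [] := by intro h; simp [h] at h1
        have step : loopA (x :: (pre ++ r :: m')) a (1 + pre.length)
            = loopA (x :: (pre ++ m')) (a ++ [r.getD 0 0]) 1 := by
          rw [loopA]
          simp only [hlt, dite_true, hget]
          rw [if_neg hrne, if_pos h1, herase]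
        rw [hadv, step, ih (pre ++ m') hihlen x (a ++ [r.getD 0 0])]
        rw [keepL_clean_append pre m' hclean, keepL_clean_append pre (r :: m') hclean,
          singL_clean_append pre m' hclean, singL_clean_append pre (r :: m') hclean]
        simp [keepL, singL, List.filter_cons, h1, show ¬ 2 ≤ r.length from hshort]

theorem loopA_head (m : List (List Int)) (x : List Int) (a : List Int) :
    loopA (x :: m) a 1 = (x :: keepL m, a ++ singL m) :=
  loopA_one m.length m (Nat.le_refl _) x a

-- one step of A's loop at i = 0 on a short head, then loopA_head: the new head m1 is skipped
theorem loopA_short_head (m0 m1 : List Int) (rest : List (List Int)) (h : ¬ 2 ≤ m0.length) :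
    loopA (m0 :: m1 :: rest) [] 0 = (m1 :: keepL rest, singL [m0] ++ singL rest) := by
  rcases short_cases m0 h with hz | hs
  · rw [loopA]
    simp only [List.length_cons, dite_true, Nat.zero_lt_succ]
    rw [show (m0 :: m1 :: rest).getD 0 [] = m0 from rfl, if_pos hz]
    rw [show (m0 :: m1 :: rest).eraseIdx 0 = m1 :: rest from rfl]
    rw [loopA_head]
    simp [singL, hz, List.filter_cons]
  · have hne : m0 ≠ [] := by intro h'; simp [h'] at hs
    rw [loopA]
    simp only [List.length_cons, dite_true, Nat.zero_lt_succ]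
    rw [show (m0 :: m1 :: rest).getD 0 [] = m0 from rfl, if_neg hne, if_pos hs]
    rw [show (m0 :: m1 :: rest).eraseIdx 0 = m1 :: rest from rfl]
    rw [loopA_head]
    simp [singL, hs, List.filter_cons]

theorem loopA_long_head (m0 : List Int) (m : List (List Int)) (h : 2 ≤ m0.length) :
    loopA (m0 :: m) [] 0 = (m0 :: keepL m, singL m) := by
  have hne : m0 ≠ [] := by intro h'; simp [h'] at h
  rw [loopA]
  simp only [List.length_cons, dite_true, Nat.zero_lt_succ]
  rw [show (m0 :: m).getD 0 [] = m0 from rfl, if_neg hne, if_neg (by omega)]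
  simpa using loopA_head m m0 []

-- ===== VERDICT (by name: the statement is the Claim_ definition above) =====
theorem filter_matrix_spec : Claim_unchanged_filter_matrix := by
  intro matrix _dom hpre hD
  match matrix with
  | [] => exact absurd rfl hpre.1
  | [m0] =>
    have h0 : 2 ≤ m0.length := hpre.2 rfl
    have hA : loopA [m0] [] 0 = ([m0], []) := by
      simpa [keepL, singL] using loopA_long_head m0 [] h0
    simp [filter_matrix, filter_matrix_alt, hA, keepL, singL, List.filter_cons, h0,
      show ¬ m0.length = 1 from by omega]
  | m0 :: m1 :: rest =>
    by_cases h0 : 2 ≤ m0.length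
    · -- head long: both keep it in front and filter the tail
      have hA := loopA_long_head m0 (m1 :: rest) h0
      simp only [filter_matrix, hA, filter_matrix_alt, keepL, singL, List.filter_cons]
      simp [keepL, singL, h0, show ¬ m0.length = 1 from by omega]
    · have hA := loopA_short_head m0 m1 rest h0
      by_cases h1 : 2 ≤ m1.length
      · -- second row long: A keeps it in front, B's first kept row is m1 too
        simp only [filter_matrix, hA, filter_matrix_alt, keepL, singL, List.filter_cons]
        simp [h0, h1, show ¬ m1.length = 1 from by omega]
        split_ifs <;> simp
      · -- both first rows short and ¬ D_: no long row at all and m0=[] ∨ m1=[] ∨ m0=m1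
        have hnd : ¬ ((∃ r ∈ m0 :: m1 :: rest, 2 ≤ r.length) ∨
            (m0 ≠ [] ∧ m1 ≠ [] ∧ m0 ≠ m1)) := by
          intro hor
          apply hD
          refine ⟨by simp, ?_, ?_⟩
          · intro r hr
            simp only [List.take_succ_cons, List.take_zero, List.mem_cons,
              List.not_mem_nil, or_false] at hr
            rcases hr with h | h <;> subst h <;> omega
          · simpa [List.getD] using hor
        push_neg at hnd
        obtain ⟨hnolong, htriv⟩ := hnd
        have hkrest : keepL rest = [] := by
          simp only [keepL, List.filter_eq_nil_iff, decide_eq_true_eq]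
          intro r hr
          have := hnolong r (by simp [hr])
          omega
        have hkm : keepL (m0 :: m1 :: rest) = [] := by
          simp [keepL, List.filter_cons, h0, h1,
            show List.filter (fun r => decide (2 ≤ r.length)) rest = [] from hkrest]
        simp only [filter_matrix, hA, filter_matrix_alt, hkm, hkrest]
        -- remaining: [m1 ++ (singL [m0] ++ singL rest)] = [singL (m0::m1::rest)]
        rcases short_cases m1 h1 with hz1 | hs1
        · -- m1 = []
          subst hz1
          simp only [singL, List.filter_cons]
          simp
          split_ifs <;> simp
        · -- m1 = [v]; then m0 = [] or m0 = m1
          obtain ⟨v, hv⟩ : ∃ v, m1 = [v] := by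
            cases m1 with
            | nil => simp at hs1
            | cons a t =>
              cases t with
              | nil => exact ⟨a, rfl⟩
              | cons b u => simp at hs1
          subst hv
          by_cases hz0 : m0 = []
          · subst hz0
            simp [singL, List.filter_cons]
          · have h01 : m0 = [v] := htriv hz0 (by simp)
            subst h01
            simp [singL, List.filter_cons]

theorem filter_matrix_changed : Claim_changed_filter_matrix := by
  unfold Claim_changed_filter_matrix
  have h0 : loopA ([[1], [2], [3, 4]] : List (List Int)) [] 0 = ([[2], [3, 4]], [1]) := by
    have := loopA_short_head [1] [2] [[3, 4]] (by simp)
    simpa [keepL, singL] using this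
  refine ⟨by decide, by decide, by decide, ?_, by decide, by decide⟩
  simp [pvDiffWitness_filter_matrix, pvDiffWitnessOut_filter_matrix, filter_matrix, h0]

theorem filter_matrix_tight : Claim_exact_filter_matrix := by
  intro matrix _dom _hpre hD heq
  match matrix, hD with
  | m0 :: m1 :: rest, ⟨_, hall, hor⟩ =>
    have hD0 : m0.length ≤ 1 := hall m0 (by simp)
    have hD1 : m1.length ≤ 1 := hall m1 (by simp)
    have hA := loopA_short_head m0 m1 rest (by omega)
    have hkm : keepL (m0 :: m1 :: rest) = keepL rest := by
      simp [keepL, List.filter_cons, show ¬ 2 ≤ m0.length from by omega,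
        show ¬ 2 ≤ m1.length from by omega]
    cases hk : keepL rest with
    | cons k t =>
      -- a long row exists: A has one more row than B
      have hlenA : (filter_matrix (m0 :: m1 :: rest)).length = 2 + t.length := by
        simp [filter_matrix, hA, hk]
        omega
      have hlenB : (filter_matrix_alt (m0 :: m1 :: rest)).length = 1 + t.length := by
        simp [filter_matrix_alt, hkm, hk]
        omega
      rw [heq, hlenB] at hlenA
      omega
    | nil =>
      -- no long row: first two rows are distinct non-empty singletons, heads differ
      have hnolong : ¬ (∃ r ∈ m0 :: m1 :: rest, 2 ≤ r.length) := by
        intro ⟨r, hr, h2⟩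
        simp only [List.mem_cons] at hr
        rcases hr with h | h | h
        · subst h; omega
        · subst h; omega
        · have : r ∈ keepL rest := by simp [keepL, List.mem_filter, h, h2]
          rw [hk] at this; simp at this
      have htriv : m0 ≠ [] ∧ m1 ≠ [] ∧ m0 ≠ m1 := by
        rcases hor with h | h
        · exact absurd h hnolong
        · simpa [List.getD] using h
      obtain ⟨u, hu⟩ : ∃ u, m0 = [u] := by
        cases m0 with
        | nil => exact absurd rfl htriv.1
        | cons a s => cases s with
          | nil => exact ⟨a, rfl⟩
          | cons b w => simp at hD0
      obtain ⟨v, hv⟩ : ∃ v, m1 = [v] := by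
        cases m1 with
        | nil => exact absurd rfl htriv.2.1
        | cons a s => cases s with
          | nil => exact ⟨a, rfl⟩
          | cons b w => simp at hD1
      subst hu hv
      have huv : u ≠ v := by
        intro h; exact htriv.2.2 (by rw [h])
      have hBval : filter_matrix_alt ([u] :: [v] :: rest)
          = [u :: v :: singL rest] := by
        simp [filter_matrix_alt, hkm, hk, singL, List.filter_cons]
      have hAval : filter_matrix ([u] :: [v] :: rest)
          = [v :: u :: singL rest] := by
        simp [filter_matrix, hA, hk, singL, List.filter_cons]
      rw [hAval, hBval] at heq
      simp only [List.cons.injEq, and_true] at heq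
      exact huv heq.1.symm
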